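-- pv_equiv track=rewrite | github.com/AdamZhouSE/pythonHomework | Code/CodeRecords/2364/60628/290496.py | isNumWithDupDigits
-- ===== SOURCE A (Python) =====
-- def isNumWithDupDigits(n):
--     s = sorted(str(n))
--     if len(s) == 1:
--         return 0
--     for i in range(len(s)-1):
--         if s[i] == s[i+1]:
--             return 1
--     if s[-1] == s[-2]:
--         return 1
--     return 0
-- ===== SOURCE B (Python) =====
-- def isNumWithDupDigits(n):
--     s = str(n)
--     return int(len(set(s)) != len(s))
-- ===== Notes on version B (the rewrite author's own statement) =====
-- stated objective: simpler
-- what changed: Replaces sort-then-adjacent-scan (plus a redundant last-pair recheck) by a single set-size vs string-length comparison on str(n).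
import Mathlib
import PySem

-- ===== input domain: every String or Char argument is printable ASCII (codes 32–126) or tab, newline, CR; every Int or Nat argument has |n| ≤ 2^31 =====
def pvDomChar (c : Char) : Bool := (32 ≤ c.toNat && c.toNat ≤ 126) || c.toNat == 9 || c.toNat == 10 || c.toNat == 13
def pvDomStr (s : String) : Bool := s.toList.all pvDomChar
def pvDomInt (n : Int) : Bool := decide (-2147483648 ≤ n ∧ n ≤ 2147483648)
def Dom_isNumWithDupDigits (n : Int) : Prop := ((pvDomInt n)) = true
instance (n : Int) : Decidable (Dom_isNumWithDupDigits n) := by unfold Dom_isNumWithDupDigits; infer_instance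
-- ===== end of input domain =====

-- B replaces A's sort-then-adjacent-scan (with its redundant last-pair recheck) by comparing
-- len(set(str(n))) with len(str(n)): no sort, one pass.

-- ===== PORT A =====
-- the for-loop over range(len(s)-1) with early 'return 1'; both pyGet? indices are in range on
-- every reachable call (len(s) ≥ 2 there), where equality of the option values is equality of the chars
def pvALoop (s : List Char) : List Int → Option Int
  | [] => none
  | i :: rest =>
    if PySem.List.pyGet? s i = PySem.List.pyGet? s (i + 1) then some 1 else pvALoop s rest

def isNumWithDupDigits (n : Int) : Int :=
  let s := PySem.List.sorted (PySem.Int.toChars n) (fun c => c) false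
  if s.length = 1 then 0
  else
    match pvALoop s (PySem.List.pyRange 0 ((s.length : Int) - 1) 1) with
    | some r => r
    | none => if PySem.List.pyGet? s (-1) = PySem.List.pyGet? s (-2) then 1 else 0

-- ===== PORT B =====
def isNumWithDupDigits_alt (n : Int) : Int :=
  let s := PySem.Int.toChars n
  if (PySem.Set.len (PySem.Set.ofList s) : Int) ≠ PySem.List.len s then 1 else 0

-- ===== PRECONDITION & SPEC =====
def Spec_isNumWithDupDigits (n : Int) (out : Int) : Prop := out = isNumWithDupDigits_alt n
instance (n : Int) (out : Int) : Decidable (Spec_isNumWithDupDigits n out) := by unfold Spec_isNumWithDupDigits; infer_instance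

-- ===== CLAIM (what is proved, stated in full; the proofs are below) =====
def Claim_equal_isNumWithDupDigits : Prop := ∀ (n : Int), Dom_isNumWithDupDigits n → Spec_isNumWithDupDigits n (isNumWithDupDigits n)

-- ===== LEMMAS AND PROOFS =====

theorem toChars_ne_nil (n : Int) : PySem.Int.toChars n ≠ [] := by
  unfold PySem.Int.toChars
  split
  · simp
  · exact List.ne_nil_of_length_pos Nat.length_toDigits_pos

theorem len_ofList_eq_iff (s : List Char) : (PySem.Set.ofList s).length = s.length ↔ s.Nodup := by
  constructor
  · intro h
    have hn := PySem.Set.nodup_ofList (xs := s)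
    have hfin : (PySem.Set.ofList s).toFinset = s.toFinset := by
      ext x; simp [PySem.Set.mem_ofList]
    have h1 : (PySem.Set.ofList s).toFinset.card = (PySem.Set.ofList s).length :=
      List.toFinset_card_of_nodup hn
    have h2 : s.toFinset.card = s.dedup.length := List.card_toFinset s
    have h3 : s.dedup.length = s.length := by rw [← h2, ← hfin, h1, h]
    exact List.dedup_eq_self.mp ((List.dedup_sublist s).eq_of_length h3)
  · intro h; rw [PySem.Set.ofList_eq_self_of_nodup s h]

-- B tests exactly the Nodup of str(n)'s characters
theorem alt_eq (n : Int) :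
    isNumWithDupDigits_alt n = if (PySem.Int.toChars n).Nodup then 0 else 1 := by
  unfold isNumWithDupDigits_alt
  by_cases h : (PySem.Int.toChars n).Nodup
  · simp [PySem.Set.len, PySem.List.len, (len_ofList_eq_iff _).mpr h, h]
  · have hne : (PySem.Set.ofList (PySem.Int.toChars n)).length ≠ (PySem.Int.toChars n).length :=
      fun hc => h ((len_ofList_eq_iff _).mp hc)
    simp only [PySem.Set.len, PySem.List.len]
    rw [if_pos (by exact_mod_cast hne), if_neg h]

theorem pvALoop_eq_none_iff (s : List Char) (l : List Int) :
    pvALoop s l = none ↔ ∀ i ∈ l, ¬ PySem.List.pyGet? s i = PySem.List.pyGet? s (i + 1) := by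
  induction l with
  | nil => simp [pvALoop]
  | cons i rest ih =>
    by_cases h : PySem.List.pyGet? s i = PySem.List.pyGet? s (i + 1) <;>
      simp [pvALoop, h, ih]

theorem pvALoop_eq_some (s : List Char) (l : List Int) (h : ¬ pvALoop s l = none) :
    pvALoop s l = some 1 := by
  induction l with
  | nil => simp [pvALoop] at h
  | cons i rest ih =>
    by_cases hc : PySem.List.pyGet? s i = PySem.List.pyGet? s (i + 1)
    · simp [pvALoop, hc]
    · simp only [pvALoop, if_neg hc] at h ⊢; exact ih h

-- a ≤-sorted list whose adjacent entries all differ has no duplicates at all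
theorem nodup_of_sorted_adj (s : List Char)
    (hp : s.Pairwise (fun a b => a ≤ b))
    (hadj : ∀ k : Nat, (hk : k + 1 < s.length) → s[k]'(Nat.lt_of_succ_lt hk) ≠ s[k+1]'hk) :
    s.Nodup := by
  have hlt : ∀ k : Nat, (hk : k + 1 < s.length) → s[k]'(Nat.lt_of_succ_lt hk) < s[k+1]'hk := by
    intro k hk
    have hle := List.pairwise_iff_getElem.mp hp k (k+1) (Nat.lt_of_succ_lt hk) hk (Nat.lt_succ_self k)
    exact lt_of_le_of_ne hle (hadj k hk)
  have hmono : ∀ i j : Nat, (hij : i < j) → (hj : j < s.length) → s[i]'(Nat.lt_trans hij hj) < s[j]'hj := by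
    intro i j hij
    induction j with
    | zero => omega
    | succ m ihm =>
      intro hj
      rcases Nat.lt_or_ge i m with h | h
      · exact lt_trans (ihm h (Nat.lt_of_succ_lt hj)) (hlt m hj)
      · have him : i = m := by omega
        subst him
        exact hlt i hj
  apply List.pairwise_iff_getElem.mpr
  intro i j hi hj hij
  exact ne_of_lt (hmono i j hij hj)

-- ===== VERDICT (by name: the statement is the Claim_ definition above) =====
theorem isNumWithDupDigits_spec : Claim_equal_isNumWithDupDigits := by
  intro n _
  unfold Spec_isNumWithDupDigits
  rw [alt_eq]
  unfold isNumWithDupDigits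
  set t := PySem.Int.toChars n with ht
  set s := PySem.List.sorted t (fun c => c) false with hs
  have hperm : s.Perm t := PySem.List.sorted_perm ..
  have hlen : s.length = t.length := hperm.length_eq
  have hnod : s.Nodup ↔ t.Nodup := hperm.nodup_iff
  have hpos : 0 < s.length := by
    rw [hlen]; exact List.length_pos_of_ne_nil (toChars_ne_nil n)
  simp only []
  by_cases h1 : s.length = 1
  · have hsnd : s.Nodup := by
      match s, h1 with
      | [a], _ => simp
    rw [if_pos h1, if_pos (hnod.mp hsnd)]
  · have h2 : 2 ≤ s.length := by omega
    rw [if_neg h1]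
    cases hloop : pvALoop s (PySem.List.pyRange 0 ((s.length : Int) - 1) 1) with
    | some r =>
      have hr : r = 1 := by
        have := pvALoop_eq_some s _ (by rw [hloop]; simp)
        rw [hloop] at this; exact Option.some.inj this
      subst hr
      -- there is an adjacent duplicate, hence ¬ t.Nodup
      have hex : ∃ i ∈ PySem.List.pyRange 0 ((s.length : Int) - 1) 1,
          PySem.List.pyGet? s i = PySem.List.pyGet? s (i + 1) := by
        by_contra hno
        push Not at hno
        rw [(pvALoop_eq_none_iff s _).mpr hno] at hloop
        simp at hloop
      obtain ⟨i, hmem, heq⟩ := hex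
      rw [PySem.List.mem_pyRange_one] at hmem
      obtain ⟨hi0, hilt⟩ := hmem
      have hk1 : i.toNat + 1 < s.length := by omega
      have hget1 : PySem.List.pyGet? s i = some (s[i.toNat]'(by omega)) :=
        PySem.List.pyGet?_eq_some_getElem s hi0 (by omega)
      have hget2 : PySem.List.pyGet? s (i + 1) = some (s[i.toNat + 1]'hk1) := by
        have := PySem.List.pyGet?_eq_some_getElem s (i := i + 1) (by omega) (by omega)
        rw [this]
        simp only [show (i + 1).toNat = i.toNat + 1 from by omega]
      rw [hget1, hget2] at heq
      have hdup : ¬ s.Nodup := by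
        intro hn
        exact (List.pairwise_iff_getElem.mp hn i.toNat (i.toNat + 1) (by omega) hk1 (by omega))
          (Option.some.inj heq)
      rw [if_neg (fun hc => hdup (hnod.mpr hc))]
    | none =>
      have hall := (pvALoop_eq_none_iff s _).mp hloop
      have hadj : ∀ k : Nat, (hk : k + 1 < s.length) → s[k]'(Nat.lt_of_succ_lt hk) ≠ s[k+1]'hk := by
        intro k hk hceq
        have hmem : (k : Int) ∈ PySem.List.pyRange 0 ((s.length : Int) - 1) 1 := by
          rw [PySem.List.mem_pyRange_one]; omega
        apply hall _ hmem
        have hget1 : PySem.List.pyGet? s (k : Int) = some (s[k]'(by omega)) := by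
          have := PySem.List.pyGet?_eq_some_getElem s (i := (k : Int)) (by omega) (by exact_mod_cast (by omega : (k : Int) < (s.length : Int)))
          rw [this]
          simp only [Int.toNat_natCast]
        have hget2 : PySem.List.pyGet? s ((k : Int) + 1) = some (s[k+1]'hk) := by
          have := PySem.List.pyGet?_eq_some_getElem s (i := (k : Int) + 1) (by omega) (by exact_mod_cast (by omega : (k : Int) + 1 < (s.length : Int)))
          rw [this]
          simp only [show ((k : Int) + 1).toNat = k + 1 from by omega]
        rw [hget1, hget2, hceq]
      have hsnd : s.Nodup := nodup_of_sorted_adj s (PySem.List.sorted_pairwise ..) hadj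
      -- the trailing s[-1] == s[-2] test is false too
      have hg1 : PySem.List.pyGet? s (-1) = some (s[s.length - 1]'(by omega)) := by
        have h : (-1 : Int) = -((1 : Nat) : Int) := by norm_num
        rw [h, PySem.List.pyGet?_neg_natCast s 1 (by omega) (by omega)]
        exact List.getElem?_eq_getElem (by omega)
      have hg2 : PySem.List.pyGet? s (-2) = some (s[s.length - 2]'(by omega)) := by
        have h : (-2 : Int) = -((2 : Nat) : Int) := by norm_num
        rw [h, PySem.List.pyGet?_neg_natCast s 2 (by omega) (by omega)]
        exact List.getElem?_eq_getElem (by omega)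
      have hne : s[s.length - 1]'(by omega) ≠ s[s.length - 2]'(by omega) := by
        intro hceq
        exact (List.pairwise_iff_getElem.mp hsnd (s.length - 2) (s.length - 1) (by omega) (by omega) (by omega))
          hceq.symm
      rw [hg1, hg2, if_neg (fun hc => hne (Option.some.inj hc)), if_pos (hnod.mp hsnd)]
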